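-- pv_equiv track=rewrite | github.com/FilipePacheco73/BigTech_Training | Seating Arrangement.py | minOverallAwkwardness
-- ===== SOURCE A (Python) =====
-- def minOverallAwkwardness(arr):
--   # Write your code here
--
--   aux = 0
--   minimal = 20
--   check_arr = arr # create a copy
--   check_arr.sort(reverse=True) # sort array
--
--   while aux < len(arr)-1:
--       temp = check_arr[aux+1]
--       check_arr[aux+1] = check_arr[aux]
--       check_arr[aux] = temp
--       aux += 1
--
--       maximal = [] # contains the awkwardness
--       for i in range(len(arr)-1):
--           maximal.append(abs(check_arr[i]-check_arr[i+1]))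
--
--       maximal.append(abs(check_arr[-1]-check_arr[0]))
--
--       if minimal > max(maximal):
--           minimal = max(maximal)
--
--   return minimal
-- ===== SOURCE B (Python) =====
-- def minOverallAwkwardness(arr):
--     # Sort descending once (same in-place sort A performs), then evaluate each
--     # bubbling step as "insert the max into gap j of the rest", using the fixed
--     # circular-difference list d with prefix/suffix running maxima, O(n log n).
--     arr.sort(reverse=True)
--     n = len(arr)
--     if n < 2:
--         return 20
--     s0 = arr[0]
--     t = arr[1:]
--     m = n - 1
--     d = [abs(t[j] - t[(j + 1) % m]) for j in range(m)]
--     pre = [0]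
--     for x in d:
--         pre.append(max(pre[-1], x))
--     suf = [0]
--     for x in reversed(d):
--         suf.append(max(suf[-1], x))
--     suf.reverse()
--     best = 20
--     for j in range(m):
--         cand = max(pre[j], suf[j + 1], abs(t[j] - s0), abs(s0 - t[(j + 1) % m]))
--         if cand < best:
--             best = cand
--     return best
-- ===== Notes on version B (the rewrite author's own statement) =====
-- stated objective: faster
-- what changed: Instead of rebuilding the whole array after every adjacent swap and rescanning all n circular differences for each of the n-1 arrangements, B sorts once, views each arrangement as inserting the maximum into one gap of the fixed rest-cycle, and answers each gap query in O(1) from precomputed prefix/suffix running maxima of the fixed circular-difference list.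
import Mathlib
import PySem

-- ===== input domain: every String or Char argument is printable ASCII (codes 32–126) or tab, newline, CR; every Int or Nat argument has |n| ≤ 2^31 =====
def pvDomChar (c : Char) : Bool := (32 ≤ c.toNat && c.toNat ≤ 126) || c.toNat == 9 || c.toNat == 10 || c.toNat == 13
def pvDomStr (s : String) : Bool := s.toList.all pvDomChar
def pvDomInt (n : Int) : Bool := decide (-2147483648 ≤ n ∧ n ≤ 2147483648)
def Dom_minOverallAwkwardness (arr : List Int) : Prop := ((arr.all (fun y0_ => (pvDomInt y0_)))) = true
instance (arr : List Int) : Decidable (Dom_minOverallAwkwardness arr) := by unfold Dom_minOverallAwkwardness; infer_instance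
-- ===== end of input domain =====

-- B replaces A's rebuild-and-rescan over every adjacent swap by one sort plus prefix/suffix
-- running maxima of the fixed circular-difference list (O(n log n) vs O(n^2)).
-- Both the Python A and the Python B sort the argument list in place; the equivalence proved
-- here is about the RETURN value only.

-- ===== PORT A =====
def pvA_loop (check : List Int) (minimal : Int) (aux : Nat) : Int :=
  if h : (aux : Int) < PySem.List.len check - 1 then
    let temp := PySem.List.pyGetD check ((aux : Int) + 1) 0
    let c1 := PySem.List.pySetD check ((aux : Int) + 1) (PySem.List.pyGetD check (aux : Int) 0)
    let c2 := PySem.List.pySetD c1 (aux : Int) temp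
    let maximal := ((PySem.List.pyRange 0 (PySem.List.len check - 1) 1).map
        (fun i => |PySem.List.pyGetD c2 i 0 - PySem.List.pyGetD c2 (i + 1) 0|))
      ++ [|PySem.List.pyGetD c2 (-1) 0 - PySem.List.pyGetD c2 0 0|]
    let mx := (PySem.List.max? maximal (fun y => y)).getD 0
    pvA_loop c2 (if minimal > mx then mx else minimal) (aux + 1)
  else minimal
termination_by check.length - aux
decreasing_by simp only [PySem.List.length_pySetD]; simp [PySem.List.len_eq] at h; omega

def minOverallAwkwardness (arr : List Int) : Int :=
  pvA_loop (PySem.List.sorted arr (fun x => x) true) 20 0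

-- ===== PORT B =====
def pvB_scan (d : List Int) : List Int :=
  d.foldl (fun pre x => pre ++ [max (PySem.List.pyGetD pre (-1) 0) x]) [0]

def minOverallAwkwardness_alt (arr : List Int) : Int :=
  let s := PySem.List.sorted arr (fun x => x) true
  let n := PySem.List.len s
  if n < 2 then 20 else
    let s0 := PySem.List.pyGetD s 0 0
    let t := PySem.List.slice s (some 1) none
    let m := n - 1
    let d := (PySem.List.pyRange 0 m 1).map
        (fun j => |PySem.List.pyGetD t j 0 - PySem.List.pyGetD t (PySem.Int.mod (j + 1) m) 0|)
    let pre := pvB_scan d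
    let suf := (pvB_scan d.reverse).reverse
    (PySem.List.pyRange 0 m 1).foldl
      (fun best j =>
        let cand := max (max (max (PySem.List.pyGetD pre j 0) (PySem.List.pyGetD suf (j + 1) 0))
            |PySem.List.pyGetD t j 0 - s0|) |s0 - PySem.List.pyGetD t (PySem.Int.mod (j + 1) m) 0|
        if cand < best then cand else best) 20

-- ===== PRECONDITION & SPEC =====
def Spec_minOverallAwkwardness (arr : List Int) (out : Int) : Prop := out = minOverallAwkwardness_alt arr
instance (arr : List Int) (out : Int) : Decidable (Spec_minOverallAwkwardness arr out) := by unfold Spec_minOverallAwkwardness; infer_instance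

-- ===== CLAIM (what is proved, stated in full; the proofs are below) =====
def Claim_equal_minOverallAwkwardness : Prop := ∀ (arr : List Int), Dom_minOverallAwkwardness arr → Spec_minOverallAwkwardness arr (minOverallAwkwardness arr)

-- ===== LEMMAS AND PROOFS =====

-- running maximum seeded with 0 (what both programs' max computations reduce to)
def pvF (l : List Int) : Int := l.foldl max 0

-- linear adjacent |differences|
def pvLd (l : List Int) : List Int := List.zipWith (fun a b => |a - b|) l l.tail

-- circular adjacent |differences| (what B's list d denotes)
def pvDL (t : List Int) : List Int :=
  (List.range t.length).map (fun k => |t.getD k 0 - t.getD ((k + 1) % t.length) 0|)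

-- the arrangement after k bubbling swaps: the max s0 sits after the first k of the rest
def pvCfg (s0 : Int) (t : List Int) (k : Nat) : List Int := t.take k ++ s0 :: t.drop k

-- the circular max-awkwardness of arrangement (j+1), as B computes it
def pvCand (s0 : Int) (t : List Int) (j : Nat) : Int :=
  max (max (max (pvF ((pvDL t).take j)) (pvF ((pvDL t).drop (j + 1))))
    |t.getD j 0 - s0|) |s0 - t.getD ((j + 1) % t.length) 0|

lemma pvF_nonneg (l : List Int) : 0 ≤ pvF l := (PySem.List.le_foldl_max l 0).1

lemma pv_foldl_max_shift (v : List Int) : ∀ a b : Int, v.foldl max (max a b) = max a (v.foldl max b) := by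
  induction v with
  | nil => intro a b; rfl
  | cons x v ih =>
    intro a b
    simp only [List.foldl_cons, max_assoc]
    exact ih a (max b x)

lemma pvF_cons (x : Int) (l : List Int) : pvF (x :: l) = max x (pvF l) := by
  simp only [pvF, List.foldl_cons]
  rw [max_comm 0 x, pv_foldl_max_shift]

lemma pvF_append (u v : List Int) : pvF (u ++ v) = max (pvF u) (pvF v) := by
  have h0 : (0 : Int) ≤ u.foldl max 0 := pvF_nonneg u
  simp only [pvF, List.foldl_append]
  calc List.foldl max (u.foldl max 0) v
      = List.foldl max (max (u.foldl max 0) 0) v := by rw [max_eq_left h0]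
    _ = max (u.foldl max 0) (v.foldl max 0) := pv_foldl_max_shift v _ 0

lemma pvF_perm {l l' : List Int} (h : l.Perm l') : pvF l = pvF l' :=
  List.Perm.foldl_op_eq h

lemma pv_length_pvLd (l : List Int) : (pvLd l).length = l.length - 1 := by
  simp [pvLd]

lemma pv_getElem_pvLd (l : List Int) (i : Nat) (h : i < (pvLd l).length) :
    (pvLd l)[i] = |l[i]'(by simp [pvLd] at h; omega) - l[i+1]'(by simp [pvLd] at h; omega)| := by
  simp only [pvLd, List.getElem_zipWith, List.getElem_tail]

lemma pvLd_take (l : List Int) (k : Nat) : pvLd (l.take (k + 1)) = (pvLd l).take k := by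
  apply List.ext_getElem
  · simp [pv_length_pvLd]; omega
  · intro i h1 h2
    rw [List.getElem_take, pv_getElem_pvLd, pv_getElem_pvLd]
    simp only [List.getElem_take]

lemma pvLd_drop (l : List Int) (k : Nat) : pvLd (l.drop k) = (pvLd l).drop k := by
  apply List.ext_getElem
  · simp only [pv_length_pvLd, List.length_drop]
    omega
  · intro i h1 h2
    rw [List.getElem_drop, pv_getElem_pvLd, pv_getElem_pvLd]
    simp only [List.getElem_drop]
    congr 2

lemma pvLd_append (u w : List Int) (hu : u ≠ []) (hw : w ≠ []) :
    pvLd (u ++ w) = pvLd u ++ |u.getLast hu - w.head hw| :: pvLd w := by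
  induction u with
  | nil => exact absurd rfl hu
  | cons x u ih =>
    cases u with
    | nil =>
      cases w with
      | nil => exact absurd rfl hw
      | cons y w' => simp [pvLd]
    | cons z u' =>
      have h2 : (z :: u') ≠ [] := by simp
      have hstep : pvLd (x :: (z :: u' ++ w)) = |x - z| :: pvLd (z :: u' ++ w) := by simp [pvLd]
      rw [List.cons_append, hstep, ih h2]
      simp [pvLd, List.getLast_cons h2]

lemma pvDL_eq (t : List Int) (ht : t ≠ []) :
    pvDL t = pvLd t ++ [|t.getD (t.length - 1) 0 - t.getD 0 0|] := by
  have hpos : 0 < t.length := List.length_pos_iff.mpr ht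
  apply List.ext_getElem
  · simp [pvDL, pv_length_pvLd]; omega
  · intro i h1 h2
    simp only [pvDL, List.length_map, List.length_range] at h1
    simp only [pvDL, List.getElem_map, List.getElem_range]
    by_cases hlt : i < t.length - 1
    · rw [List.getElem_append_left (by rw [pv_length_pvLd]; omega), pv_getElem_pvLd,
        Nat.mod_eq_of_lt (by omega), List.getD_eq_getElem _ _ (by omega),
        List.getD_eq_getElem _ _ (by omega)]
    · have hi : i = t.length - 1 := by omega
      rw [List.getElem_append_right (by rw [pv_length_pvLd]; omega)]
      have hx : t.length - 1 + 1 = t.length := by omega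
      simp [pv_length_pvLd, hi, hx, Nat.mod_self]

lemma pv_getElem_pvCfg (s0 : Int) (t : List Int) (k : Nat) (hk : k ≤ t.length)
    (i : Nat) (hi : i < t.length + 1) :
    (pvCfg s0 t k)[i]'(by simp [pvCfg]; omega) =
      if h : i < k then t[i]'(by omega) else if h2 : i = k then s0 else t[i-1]'(by omega) := by
  have hlen : (t.take k).length = k := by simp; omega
  simp only [pvCfg]
  split_ifs with h h2
  · rw [List.getElem_append_left (by omega)]; simp [List.getElem_take]
  · subst h2
    rw [List.getElem_append_right (by omega)]
    simp [hlen]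
  · rw [List.getElem_append_right (by omega)]
    simp only [List.getElem_cons, List.getElem_drop, hlen]
    split_ifs with h3
    · omega
    · congr 1; omega

lemma pv_length_pvCfg (s0 : Int) (t : List Int) (k : Nat) : (pvCfg s0 t k).length = t.length + 1 := by
  simp [pvCfg]

-- the double pySetD in A's loop body performs one bubbling step
lemma pv_swap_step (s0 : Int) (t : List Int) (k : Nat) (hk : k < t.length) :
    PySem.List.pySetD
      (PySem.List.pySetD (pvCfg s0 t k) ((k : Int) + 1) (PySem.List.pyGetD (pvCfg s0 t k) (k : Int) 0))
      (k : Int) (PySem.List.pyGetD (pvCfg s0 t k) ((k : Int) + 1) 0) = pvCfg s0 t (k + 1) := by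
  have hcast : ((k : Int) + 1) = ((k + 1 : Nat) : Int) := by push_cast; ring
  rw [hcast]
  simp only [PySem.List.pySetD_natCast, PySem.List.pyGetD_natCast]
  have hg1 : (pvCfg s0 t k).getD k 0 = s0 := by
    rw [List.getD_eq_getElem _ _ (by rw [pv_length_pvCfg]; omega), pv_getElem_pvCfg s0 t k (by omega) k (by omega)]
    simp
  have hg2 : (pvCfg s0 t k).getD (k + 1) 0 = t[k] := by
    rw [List.getD_eq_getElem _ _ (by rw [pv_length_pvCfg]; omega), pv_getElem_pvCfg s0 t k (by omega) (k+1) (by omega)]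
    simp
  rw [hg1, hg2]
  apply List.ext_getElem
  · simp [pv_length_pvCfg]
  · intro i hA hB
    have hA' : i < t.length + 1 := by simpa [pv_length_pvCfg] using hB
    rw [List.getElem_set, List.getElem_set, pv_getElem_pvCfg s0 t (k+1) (by omega) i hA']
    split_ifs with e1 e2 e3 e4 e5 <;> first
      | rfl
      | omega
      | (subst e1; rfl)
      | (rw [pv_getElem_pvCfg s0 t k (by omega) i hA']; split_ifs <;> first | rfl | omega)

lemma pvLd_cons (x : Int) (w : List Int) (hw : w ≠ []) :
    pvLd (x :: w) = |x - w.head hw| :: pvLd w := by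
  cases w with
  | nil => exact absurd rfl hw
  | cons y w' => simp [pvLd]

lemma pvLd_nonneg (l : List Int) : ∀ x ∈ pvLd l, 0 ≤ x := by
  intro x hx
  obtain ⟨i, hi, rfl⟩ := List.mem_iff_getElem.mp hx
  rw [pv_getElem_pvLd]
  exact abs_nonneg _

lemma pv_max_eq_pvF (L : List Int) (h : L ≠ []) (hall : ∀ x ∈ L, 0 ≤ x) :
    (PySem.List.max? L (fun y => y)).getD 0 = pvF L := by
  cases L with
  | nil => exact absurd rfl h
  | cons x tl =>
    rw [PySem.List.max?_id_cons, Option.getD_some, pvF_cons]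
    have hx : 0 ≤ x := hall x (by simp)
    show List.foldl max x tl = max x (List.foldl max 0 tl)
    rw [← pv_foldl_max_shift tl x 0, max_eq_left hx]

-- A's maximal list, written with Nat-indexed adjacent differences
lemma pv_maximal_eq (c : List Int) (hc : c ≠ []) :
    ((PySem.List.pyRange 0 (PySem.List.len c - 1) 1).map
        (fun i => |PySem.List.pyGetD c i 0 - PySem.List.pyGetD c (i + 1) 0|))
      ++ [|PySem.List.pyGetD c (-1) 0 - PySem.List.pyGetD c 0 0|]
    = pvLd c ++ [|c.getD (c.length - 1) 0 - c.getD 0 0|] := by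
  have hpos : 0 < c.length := List.length_pos_iff.mpr hc
  have hlen : (PySem.List.len c - 1) = ((c.length - 1 : Nat) : Int) := by
    simp [PySem.List.len_eq]; omega
  congr 1
  · rw [hlen, PySem.List.pyRange_one]
    have harg : ((c.length - 1 : Nat) : Int) - 0 = ((c.length - 1 : Nat) : Int) := by ring
    rw [harg, Int.toNat_natCast, List.map_map]
    apply List.ext_getElem
    · simp [pv_length_pvLd]
    · intro i h1 h2
      simp only [List.length_map, List.length_range] at h1
      simp only [List.getElem_map, List.getElem_range, Function.comp_apply]
      rw [pv_getElem_pvLd c i (by rw [pv_length_pvLd]; omega)]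
      have hz : (0 : Int) + (i : Int) = ((i : Nat) : Int) := by ring
      have hz1 : (0 : Int) + (i : Int) + 1 = ((i + 1 : Nat) : Int) := by push_cast; ring
      rw [hz]
      simp only [PySem.List.pyGetD_natCast]
      rw [show ((i : Int) + 1) = ((i + 1 : Nat) : Int) by push_cast; ring]
      simp only [PySem.List.pyGetD_natCast]
      rw [List.getD_eq_getElem _ _ (by omega), List.getD_eq_getElem _ _ (by omega)]
  · rw [PySem.List.pyGetD_neg_one c 0 hc, PySem.List.pyGetD_zero, List.getLast_eq_getElem,
      List.getD_eq_getElem _ _ (show c.length - 1 < c.length by omega),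
      List.getD_eq_getElem _ _ hpos]

-- A's scanned maximum over arrangement j+1 equals B's O(1) candidate
lemma pv_mx_eq_cand (s0 : Int) (t : List Int) (j : Nat) (hj : j < t.length) :
    (PySem.List.max? (((PySem.List.pyRange 0 (PySem.List.len (pvCfg s0 t (j + 1)) - 1) 1).map
        (fun i => |PySem.List.pyGetD (pvCfg s0 t (j + 1)) i 0 - PySem.List.pyGetD (pvCfg s0 t (j + 1)) (i + 1) 0|))
      ++ [|PySem.List.pyGetD (pvCfg s0 t (j + 1)) (-1) 0 - PySem.List.pyGetD (pvCfg s0 t (j + 1)) 0 0|])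
      (fun y => y)).getD 0 = pvCand s0 t j := by
  have hm : 0 < t.length := by omega
  have ht : t ≠ [] := List.ne_nil_of_length_pos hm
  have hlenc : (pvCfg s0 t (j + 1)).length = t.length + 1 := pv_length_pvCfg s0 t (j + 1)
  have hcne : pvCfg s0 t (j + 1) ≠ [] := List.ne_nil_of_length_pos (by omega)
  rw [pv_maximal_eq _ hcne, pv_max_eq_pvF _ (by simp)
    (by
      intro x hx
      rcases List.mem_append.mp hx with h | h
      · exact pvLd_nonneg _ x h
      · simp at h; rw [h]; exact abs_nonneg _)]
  -- the wrap-around difference of the arrangement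
  have hwrap : |(pvCfg s0 t (j + 1)).getD ((pvCfg s0 t (j + 1)).length - 1) 0 -
      (pvCfg s0 t (j + 1)).getD 0 0| =
      |(if t.length < j + 1 then (0:Int) else if t.length = j + 1 then s0 else t[t.length - 1]'(by omega)) - t[0]| := by
    rw [hlenc]
    have e1 : (pvCfg s0 t (j + 1)).getD (t.length + 1 - 1) 0 =
        (pvCfg s0 t (j + 1))[t.length]'(by omega) := List.getD_eq_getElem _ _ (by omega)
    have e2 : (pvCfg s0 t (j + 1)).getD 0 0 = (pvCfg s0 t (j + 1))[0]'(by omega) :=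
      List.getD_eq_getElem _ _ (by omega)
    rw [e1, e2, pv_getElem_pvCfg s0 t (j + 1) (by omega) t.length (by omega),
      pv_getElem_pvCfg s0 t (j + 1) (by omega) 0 (by omega)]
    rw [dif_neg (show ¬(t.length < j + 1) by omega), dif_pos (show 0 < j + 1 by omega),
      if_neg (show ¬(t.length < j + 1) by omega)]
    by_cases hc : t.length = j + 1
    · rw [dif_pos hc, if_pos hc]
    · rw [dif_neg hc, if_neg hc]
  by_cases hcase : j + 1 < t.length
  · -- the max is inserted strictly inside the rest
    have hu : t.take (j + 1) ≠ [] := List.ne_nil_of_length_pos (by simp; omega)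
    have hv : t.drop (j + 1) ≠ [] := List.ne_nil_of_length_pos (by simp; omega)
    have hshape : pvCfg s0 t (j + 1) = t.take (j + 1) ++ (s0 :: t.drop (j + 1)) := rfl
    have hLd : pvLd (pvCfg s0 t (j + 1)) =
        (pvLd t).take j ++ |t[j]'(by omega) - s0| ::
          |s0 - t[j + 1]'(by omega)| :: (pvLd t).drop (j + 1) := by
      have hgl : (t.take (j + 1)).getLast hu = t[j]'(by omega) := by
        rw [List.getLast_eq_getElem]
        have hidx : (t.take (j + 1)).length - 1 = j := by simp; omega
        simp only [List.getElem_take, hidx]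
      rw [hshape, pvLd_append _ _ hu (by simp), pvLd_cons _ _ hv, List.head_cons,
        pvLd_take, pvLd_drop, List.head_drop, hgl]
    rw [hLd, hwrap, if_neg (show ¬(t.length < j + 1) by omega),
      if_neg (show ¬(t.length = j + 1) by omega)]
    simp only [List.append_assoc, List.cons_append]
    -- both sides are maxima of the same four groups
    have hperm : ((pvLd t).take j ++ |t[j]'(by omega) - s0| ::
          |s0 - t[j + 1]'(by omega)| :: ((pvLd t).drop (j + 1) ++
          [|t[t.length - 1]'(by omega) - t[0]|])).Perm
        ((pvLd t).take j ++ (((pvLd t).drop (j + 1) ++ [|t[t.length - 1]'(by omega) - t[0]|]) ++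
          [|t[j]'(by omega) - s0|, |s0 - t[j + 1]'(by omega)|])) := by
      apply List.Perm.append_left
      have := List.perm_append_comm
        (l₁ := [|t[j]'(by omega) - s0|, |s0 - t[j + 1]'(by omega)|])
        (l₂ := (pvLd t).drop (j + 1) ++ [|t[t.length - 1]'(by omega) - t[0]|])
      simpa using this
    rw [pvF_perm hperm, pvF_append, pvF_append]
    have hfour : pvF [|t[j]'(by omega) - s0|, |s0 - t[j + 1]'(by omega)|] =
        max |t[j]'(by omega) - s0| |s0 - t[j + 1]'(by omega)| := by
      simp only [pvF, List.foldl_cons, List.foldl_nil]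
      have hz : max (0 : Int) |t[j]'(by omega) - s0| = |t[j]'(by omega) - s0| :=
        max_eq_right (abs_nonneg _)
      rw [hz]
    rw [hfour]
    -- now rewrite pvCand's pieces
    have hDL := pvDL_eq t ht
    have htk : (pvDL t).take j = (pvLd t).take j := by
      rw [hDL, List.take_append_of_le_length (by rw [pv_length_pvLd]; omega)]
    have hdr : (pvDL t).drop (j + 1) =
        (pvLd t).drop (j + 1) ++ [|t[t.length - 1]'(by omega) - t[0]|] := by
      rw [hDL, List.drop_append_of_le_length (by rw [pv_length_pvLd]; omega)]
      congr 2
      rw [List.getD_eq_getElem _ _ (by omega), List.getD_eq_getElem _ _ (by omega)]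
    have hgj : t.getD j 0 = t[j]'(by omega) := List.getD_eq_getElem _ _ (by omega)
    have hmod : (j + 1) % t.length = j + 1 := Nat.mod_eq_of_lt hcase
    have hgj1 : t.getD ((j + 1) % t.length) 0 = t[j + 1]'(by omega) := by
      rw [hmod]; exact List.getD_eq_getElem _ _ (by omega)
    unfold pvCand
    rw [htk, hdr, hgj, hgj1]
    simp [max_assoc]
  · -- the max goes to the very end (j + 1 = t.length)
    have hj1 : j + 1 = t.length := by omega
    have hshape : pvCfg s0 t (j + 1) = t ++ [s0] := by
      simp [pvCfg, hj1]
    have hLd : pvLd (pvCfg s0 t (j + 1)) = pvLd t ++ [|t[t.length - 1]'(by omega) - s0|] := by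
      rw [hshape, pvLd_append _ _ ht (by simp)]
      have : pvLd [s0] = [] := by simp [pvLd]
      rw [this, List.head_cons, List.getLast_eq_getElem]
    rw [hLd, hwrap, if_neg (show ¬(t.length < j + 1) by omega), if_pos hj1.symm]
    rw [pvF_append, pvF_append]
    have hDL := pvDL_eq t ht
    have htk : (pvDL t).take j = pvLd t := by
      rw [hDL, List.take_append_of_le_length (by rw [pv_length_pvLd]; omega)]
      apply List.take_of_length_le
      rw [pv_length_pvLd]; omega
    have hdr : (pvDL t).drop (j + 1) = [] := by
      apply List.drop_eq_nil_of_le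
      simp [pvDL]; omega
    have hgj : t.getD j 0 = t[t.length - 1]'(by omega) := by
      rw [List.getD_eq_getElem _ _ (by omega)]
      congr 1; omega
    have hmod : (j + 1) % t.length = 0 := by rw [hj1, Nat.mod_self]
    have hgj1 : t.getD ((j + 1) % t.length) 0 = t[0] := by
      rw [hmod]; exact List.getD_eq_getElem _ _ (by omega)
    unfold pvCand
    rw [htk, hdr, hgj, hgj1]
    have h1 : pvF [|t[t.length - 1]'(by omega) - s0|] = |t[t.length - 1]'(by omega) - s0| := by
      simp only [pvF, List.foldl_cons, List.foldl_nil]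
      exact max_eq_right (abs_nonneg _)
    have h2 : pvF [|s0 - t[0]|] = |s0 - t[0]| := by
      simp only [pvF, List.foldl_cons, List.foldl_nil]
      exact max_eq_right (abs_nonneg _)
    have h3 : pvF ([] : List Int) = 0 := rfl
    rw [h1, h2, h3, max_eq_left (pvF_nonneg _)]

lemma pvA_loop_eq_aux (s0 : Int) (t : List Int) : ∀ (fuel k : Nat) (acc : Int),
    t.length - k = fuel → k ≤ t.length →
    pvA_loop (pvCfg s0 t k) acc k =
      (List.range' k (t.length - k)).foldl
        (fun best j => if best > pvCand s0 t j then pvCand s0 t j else best) acc := by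
  intro fuel
  induction fuel with
  | zero =>
    intro k acc hf hk
    have hk' : k = t.length := by omega
    rw [pvA_loop, dif_neg (by simp [PySem.List.len_eq, pv_length_pvCfg]; omega)]
    rw [hf, List.range'_zero, List.foldl_nil]
  | succ fuel ih =>
    intro k acc hf hk
    have hklt : k < t.length := by omega
    rw [pvA_loop, dif_pos (by simp [PySem.List.len_eq, pv_length_pvCfg]; omega)]
    simp only [pv_swap_step s0 t k hklt]
    have hlen2 : PySem.List.len (pvCfg s0 t k) = PySem.List.len (pvCfg s0 t (k + 1)) := by
      simp [PySem.List.len_eq, pv_length_pvCfg]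
    rw [hlen2, pv_mx_eq_cand s0 t k hklt]
    rw [ih (k + 1) _ (by omega) (by omega)]
    rw [show t.length - k = (t.length - (k + 1)) + 1 by omega, List.range'_succ, List.foldl_cons]

lemma pvA_loop_eq (s0 : Int) (t : List Int) (k : Nat) (acc : Int) (hk : k ≤ t.length) :
    pvA_loop (pvCfg s0 t k) acc k =
      (List.range' k (t.length - k)).foldl
        (fun best j => if best > pvCand s0 t j then pvCand s0 t j else best) acc :=
  pvA_loop_eq_aux s0 t (t.length - k) k acc rfl hk

-- B's scan list is the prefix-maxima table
lemma pvB_scan_eq (d : List Int) :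
    pvB_scan d = (List.range (d.length + 1)).map (fun j => pvF (d.take j)) := by
  induction d using List.reverseRecOn with
  | nil => rfl
  | append_singleton d x ih =>
    have hstep : pvB_scan (d ++ [x]) =
        pvB_scan d ++ [max (PySem.List.pyGetD (pvB_scan d) (-1) 0) x] := by
      simp only [pvB_scan, List.foldl_append, List.foldl_cons, List.foldl_nil]
    rw [hstep, ih]
    have hne : (List.range (d.length + 1)).map (fun j => pvF (d.take j)) ≠ [] := by simp
    have hlast : PySem.List.pyGetD ((List.range (d.length + 1)).map (fun j => pvF (d.take j))) (-1) 0
        = pvF d := by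
      rw [PySem.List.pyGetD_neg_one _ _ hne, List.getLast_eq_getElem]
      simp only [List.length_map, List.length_range, List.getElem_map, List.getElem_range]
      rw [show d.length + 1 - 1 = d.length by omega, List.take_length]
    rw [hlast]
    have hrange : List.range (d.length + 1 + 1) = List.range (d.length + 1) ++ [d.length + 1] := by
      rw [List.range_succ]
    rw [show (d ++ [x]).length = d.length + 1 by simp, hrange, List.map_append]
    congr 1
    · apply List.map_congr_left
      intro j hj
      rw [List.take_append_of_le_length (by simp at hj; omega)]
    · simp only [List.map_cons, List.map_nil]
      congr 1
      rw [show d.length + 1 = (d ++ [x]).length by simp, List.take_length, pvF_append]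
      have hx : pvF [x] = max 0 x := rfl
      rw [hx, ← max_assoc, max_eq_left (pvF_nonneg d)]

lemma pvB_suf_eq (d : List Int) :
    (pvB_scan d.reverse).reverse = (List.range (d.length + 1)).map (fun j => pvF (d.drop j)) := by
  rw [pvB_scan_eq]
  apply List.ext_getElem
  · simp
  · intro i h1 h2
    simp only [List.length_reverse, List.length_map, List.length_range] at h1
    rw [List.getElem_reverse]
    simp only [List.getElem_map, List.getElem_range, List.length_map, List.length_range,
      List.length_reverse]
    rw [show d.length + 1 - 1 - i = d.length - i by omega, ← List.reverse_drop]
    exact pvF_perm (List.reverse_perm _)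

lemma pvB_d_eq (t : List Int) :
    ((PySem.List.pyRange 0 (t.length : Int) 1).map
      (fun j => |PySem.List.pyGetD t j 0 - PySem.List.pyGetD t (PySem.Int.mod (j + 1) (t.length : Int)) 0|)) = pvDL t := by
  rw [PySem.List.pyRange_one,
    show ((t.length : Int) - 0) = (t.length : Int) by ring, Int.toNat_natCast, List.map_map]
  apply List.map_congr_left
  intro k hk
  simp only [List.mem_range] at hk
  simp only [Function.comp_apply]
  rw [show (0 : Int) + (k : Int) = ((k : Nat) : Int) by ring]
  rw [show ((k : Int) + 1) = ((k + 1 : Nat) : Int) by push_cast; ring]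
  rw [PySem.Int.mod_natCast]
  simp only [PySem.List.pyGetD_natCast]




-- ===== VERDICT (by name: the statement is the Claim_ definition above) =====
theorem minOverallAwkwardness_spec : Claim_equal_minOverallAwkwardness := by
  intro arr _
  unfold Spec_minOverallAwkwardness
  unfold minOverallAwkwardness
  simp only [minOverallAwkwardness_alt]
  generalize PySem.List.sorted arr (fun x => x) true = s
  cases s with
  | nil =>
    rw [pvA_loop, dif_neg (by simp [PySem.List.len_eq]), if_pos (by simp [PySem.List.len_eq])]
  | cons s0 t =>
    by_cases hm : t.length = 0
    · obtain rfl : t = [] := List.length_eq_zero_iff.mp hm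
      rw [pvA_loop, dif_neg (by simp [PySem.List.len_eq]), if_pos (by simp [PySem.List.len_eq])]
    · have hm1 : 1 ≤ t.length := by omega
      rw [if_neg (by simp only [PySem.List.len_eq, List.length_cons]; push_cast; omega)]
      rw [PySem.List.pyGetD_zero_cons, PySem.List.slice_from_one, List.tail_cons]
      rw [show PySem.List.len (s0 :: t) - 1 = (t.length : Int) by simp [PySem.List.len_eq]]
      rw [pvB_d_eq t]
      rw [PySem.List.pyRange_one, show ((t.length : Int) - 0) = (t.length : Int) by ring,
        Int.toNat_natCast, List.foldl_map]
      rw [show (s0 :: t) = pvCfg s0 t 0 from rfl,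
        pvA_loop_eq s0 t 0 20 (Nat.zero_le _), Nat.sub_zero, ← List.range_eq_range']
      apply PySem.List.foldl_congr_mem
      intro acc j hj
      simp only [List.mem_range] at hj
      rw [show (0 : Int) + (j : Int) = ((j : Nat) : Int) by ring]
      rw [show ((j : Int) + 1) = ((j + 1 : Nat) : Int) by push_cast; ring]
      rw [PySem.Int.mod_natCast]
      simp only [PySem.List.pyGetD_natCast]
      have hpre : (pvB_scan (pvDL t)).getD j 0 = pvF ((pvDL t).take j) := by
        rw [pvB_scan_eq, List.getD_eq_getElem _ _ (by simp [pvDL]; omega)]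
        simp [pvDL]
      have hsuf : ((pvB_scan (pvDL t).reverse).reverse).getD (j + 1) 0 = pvF ((pvDL t).drop (j + 1)) := by
        rw [pvB_suf_eq, List.getD_eq_getElem _ _ (by simp [pvDL]; omega)]
        simp [pvDL]
      rw [hpre, hsuf]
      simp only [gt_iff_lt]
      rfl
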